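-- pv_equiv track=rewrite | github.com/fatjan/code-practices | python/group-leed.py | checkGroup
-- ===== SOURCE A (Python) =====
-- def checkGroup(word, group):
--     if word == '':
--         return False
--     cond = True
--     for i in word:
--         if i in group:
--             continue
--         else:
--             cond = False
--             break
--     return cond
-- ===== SOURCE B (Python) =====
-- def checkGroup(word, group):
--     # word.strip(group) removes leading and trailing characters that are in
--     # group; the result is empty exactly when every character of word is in
--     # group (any interior offender blocks stripping from both sides).
--     return word != '' and word.strip(group) == ''
-- ===== Notes on version B (the rewrite author's own statement) =====
-- stated objective: simpler
-- what changed: Replaces the explicit per-character membership loop with flag and break by a strip-based test: word.strip(group) is empty iff every character of word is in group, so B is a one-liner with no loop, flag or break.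
import Mathlib
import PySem

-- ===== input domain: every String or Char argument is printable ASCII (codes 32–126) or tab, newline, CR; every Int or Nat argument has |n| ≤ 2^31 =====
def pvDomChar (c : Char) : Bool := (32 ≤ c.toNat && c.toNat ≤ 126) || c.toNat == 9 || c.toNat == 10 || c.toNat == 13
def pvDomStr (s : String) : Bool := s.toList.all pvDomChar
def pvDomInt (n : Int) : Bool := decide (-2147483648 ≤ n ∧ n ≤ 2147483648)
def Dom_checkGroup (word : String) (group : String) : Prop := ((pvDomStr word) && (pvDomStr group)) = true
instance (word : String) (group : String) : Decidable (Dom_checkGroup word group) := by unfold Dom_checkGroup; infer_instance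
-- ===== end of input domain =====

-- B replaces A's per-character loop with flag and break by a strip-based one-liner:
-- word.strip(group) is empty exactly when every character of word is in group (simpler, no loop).

-- ===== PORT A =====
-- the for-loop with `cond` flag and early break: returns false on the first char not in group
def checkGroupLoop (g : List Char) : List Char → Bool
  | [] => true
  | c :: rest => if g.contains c then checkGroupLoop g rest else false

def checkGroup (word : String) (group : String) : Bool :=
  if word = "" then false
  else checkGroupLoop group.toList word.toList

-- ===== PORT B =====
def checkGroup_alt (word : String) (group : String) : Bool :=
  (!(word == "")) && (PySem.Str.stripChars word group == "")

-- ===== PRECONDITION & SPEC =====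
def Spec_checkGroup (word : String) (group : String) (out : Bool) : Prop := out = checkGroup_alt word group
instance (word : String) (group : String) (out : Bool) : Decidable (Spec_checkGroup word group out) := by unfold Spec_checkGroup; infer_instance

-- ===== CLAIM (what is proved, stated in full; the proofs are below) =====
def Claim_equal_checkGroup : Prop := ∀ (word : String) (group : String), Dom_checkGroup word group → Spec_checkGroup word group (checkGroup word group)

-- ===== LEMMAS AND PROOFS =====
theorem loop_eq_all (g : List Char) (l : List Char) :
    checkGroupLoop g l = l.all g.contains := by
  induction l with
  | nil => rfl
  | cons c rest ih =>
    simp only [checkGroupLoop, List.all_cons]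
    by_cases h : g.contains c = true <;> simp [ih]

theorem stripChars_nil_iff (s g : List Char) :
    (PySem.Chars.stripChars s g = [] ↔ s.all g.contains = true) := by
  unfold PySem.Chars.stripChars
  simp only [List.reverse_eq_nil_iff, List.dropWhile_eq_nil_iff, List.mem_reverse,
    List.all_eq_true]
  constructor
  · intro h x hx
    have hx2 : x ∈ List.takeWhile (fun c => g.contains c) s ∨
               x ∈ List.dropWhile (fun c => g.contains c) s := by
      rw [← List.mem_append, List.takeWhile_append_dropWhile]; exact hx
    rcases hx2 with hx' | hx'
    · exact List.mem_takeWhile_imp hx'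
    · exact h x hx'
  · intro h x hx
    have : x ∈ s := by
      have := List.takeWhile_append_dropWhile (p := fun c => g.contains c) (l := s)
      rw [← this]; exact List.mem_append_right _ hx
    exact h x this

-- ===== VERDICT (by name: the statement is the Claim_ definition above) =====
theorem checkGroup_spec : Claim_equal_checkGroup := by
  intro word group _
  unfold Spec_checkGroup checkGroup checkGroup_alt
  by_cases h : word = ""
  · simp [h]
  · have hne : (word == "") = false := by simpa using h
    simp only [h, if_false, hne, Bool.not_false, Bool.true_and]
    rw [loop_eq_all]
    have hb : (PySem.Str.stripChars word group = "") ↔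
        PySem.Chars.stripChars word.toList group.toList = [] := by
      rw [← PySem.Str.toList_stripChars, ← String.toList_inj]; rfl
    rcases h2 : word.toList.all group.toList.contains with _ | _
    · have hnn : ¬ PySem.Chars.stripChars word.toList group.toList = [] := by
        rw [stripChars_nil_iff]; simp [h2]
      have : (PySem.Str.stripChars word group == "") = false := by
        simpa [beq_iff_eq] using fun hh => hnn (hb.mp hh)
      simp [this]
    · have hyy : PySem.Chars.stripChars word.toList group.toList = [] :=
        (stripChars_nil_iff _ _).mpr h2
      simp [hb.mpr hyy]
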